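-- pv_equiv track=rewrite | github.com/yyfsunnyboy/Mathproject_tvet_mathB | skills/jh_數學2下_UnderstandingSequences.py | _generate_pattern_sequence
-- ===== SOURCE A (Python) =====
-- def _generate_pattern_sequence(pattern_type, count, c=0, a_coeff=0, b_coeff=0):
--     """
--     接收 pattern_type (字串, 如 "n_squared", "2n_plus_c", "alternating_n"),
--     count (項數), c (常數), a_coeff, b_coeff。
--     根據 pattern_type 生成指定項數的數列。
--     """
--     if pattern_type == "n_squared":
--         return [n**2 for n in range(1, count + 1)]
--     elif pattern_type == "n_squared_plus_c":
--         return [n**2 + c for n in range(1, count + 1)]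
--     elif pattern_type == "linear_an_plus_b":
--         return [a_coeff*n + b_coeff for n in range(1, count + 1)]
--     elif pattern_type == "alternating_n":
--         return [(-1)**(n+1) * n for n in range(1, count + 1)]
--     elif pattern_type == "alternating_n_squared":
--         return [(-1)**(n+1) * (n**2) for n in range(1, count + 1)]
--     else:
--         raise ValueError(f"Unknown pattern_type: {pattern_type}")
-- ===== SOURCE B (Python) =====
-- def _generate_pattern_sequence(pattern_type, count, c=0, a_coeff=0, b_coeff=0):
--     """Single accumulator loop: squares via odd-number increments, signs via
--     flipping, linear terms via repeated addition -- no per-branch comprehensions,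
--     no exponentiation."""
--     if pattern_type not in ("n_squared", "n_squared_plus_c", "linear_an_plus_b",
--                             "alternating_n", "alternating_n_squared"):
--         raise ValueError(f"Unknown pattern_type: {pattern_type}")
--     seq = []
--     sq = 0          # invariant: sq == n**2 after the update below
--     sign = 1        # invariant: sign == (-1)**(n+1)
--     lin = b_coeff   # invariant: lin == a_coeff*n + b_coeff after the update
--     for n in range(1, count + 1):
--         sq += 2*n - 1
--         lin += a_coeff
--         if pattern_type == "n_squared":
--             term = sq
--         elif pattern_type == "n_squared_plus_c":
--             term = sq + c
--         elif pattern_type == "linear_an_plus_b":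
--             term = lin
--         elif pattern_type == "alternating_n":
--             term = sign * n
--         else:
--             term = sign * sq
--         seq.append(term)
--         sign = -sign
--     return seq
-- ===== Notes on version B (the rewrite author's own statement) =====
-- stated objective: alternative
-- what changed: Replaces the five branch-selected closed-form comprehensions with one stateful loop that builds every sequence by recurrences: squares via odd-number increments, alternating signs via a flipped accumulator, linear terms via repeated addition, so no exponentiation is performed.
import Mathlib
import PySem

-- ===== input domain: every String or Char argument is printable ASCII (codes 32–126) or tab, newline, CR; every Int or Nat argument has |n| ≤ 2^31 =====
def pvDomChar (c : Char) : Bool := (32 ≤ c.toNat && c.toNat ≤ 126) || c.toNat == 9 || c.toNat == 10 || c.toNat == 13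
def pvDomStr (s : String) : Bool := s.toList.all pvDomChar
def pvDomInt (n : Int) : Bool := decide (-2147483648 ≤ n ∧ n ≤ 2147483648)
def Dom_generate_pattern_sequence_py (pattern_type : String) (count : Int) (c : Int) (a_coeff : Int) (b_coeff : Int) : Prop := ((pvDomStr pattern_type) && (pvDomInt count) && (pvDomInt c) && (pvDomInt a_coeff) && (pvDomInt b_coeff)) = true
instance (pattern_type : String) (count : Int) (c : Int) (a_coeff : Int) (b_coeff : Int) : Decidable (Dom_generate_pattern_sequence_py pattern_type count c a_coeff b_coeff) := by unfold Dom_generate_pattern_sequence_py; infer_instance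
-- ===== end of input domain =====

-- B replaces A's five branch-selected closed-form comprehensions with one stateful loop
-- building every sequence by recurrences (square += 2n-1, sign flip, linear += a); same cost.

-- ===== PORT A =====
def generate_pattern_sequence_py (pattern_type : String) (count : Int) (c : Int) (a_coeff : Int) (b_coeff : Int) : List Int :=
  if pattern_type == "n_squared" then
    (PySem.List.pyRange 1 (count + 1) 1).map (fun n => n ^ 2)
  else if pattern_type == "n_squared_plus_c" then
    (PySem.List.pyRange 1 (count + 1) 1).map (fun n => n ^ 2 + c)
  else if pattern_type == "linear_an_plus_b" then
    (PySem.List.pyRange 1 (count + 1) 1).map (fun n => a_coeff * n + b_coeff)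
  else if pattern_type == "alternating_n" then
    (PySem.List.pyRange 1 (count + 1) 1).map (fun n => (-1 : Int) ^ (n + 1).toNat * n)
  else if pattern_type == "alternating_n_squared" then
    (PySem.List.pyRange 1 (count + 1) 1).map (fun n => (-1 : Int) ^ (n + 1).toNat * n ^ 2)
  else
    []  -- Python raises ValueError here; excluded by Pre_

-- ===== PORT B =====
-- the per-iteration if/elif chain of Source B's loop body (as a helper; branches in source order)
def pvTermB (pattern_type : String) (c : Int) (n sq sign lin : Int) : Int :=
  if pattern_type == "n_squared" then sq
  else if pattern_type == "n_squared_plus_c" then sq + c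
  else if pattern_type == "linear_an_plus_b" then lin
  else if pattern_type == "alternating_n" then sign * n
  else sign * sq

-- Source B's for-loop: state (sq, sign, lin) updated by recurrences, terms appended to seq
-- (the accumulator, kept reversed and restored at the end — tail recursion = Python's loop)
def pvLoopB (pattern_type : String) (c a_coeff : Int) : List Int → Int → Int → Int → List Int → List Int
  | [], _, _, _, seq => seq.reverse
  | n :: rest, sq, sign, lin, seq =>
    let sq' := sq + (2 * n - 1)
    let lin' := lin + a_coeff
    pvLoopB pattern_type c a_coeff rest sq' (-sign) lin' (pvTermB pattern_type c n sq' sign lin' :: seq)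

def generate_pattern_sequence_py_alt (pattern_type : String) (count : Int) (c : Int) (a_coeff : Int) (b_coeff : Int) : List Int :=
  if !([ "n_squared", "n_squared_plus_c", "linear_an_plus_b", "alternating_n", "alternating_n_squared" ].contains pattern_type) then
    []  -- Python raises ValueError here; excluded by Pre_
  else
    pvLoopB pattern_type c a_coeff (PySem.List.pyRange 1 (count + 1) 1) 0 1 b_coeff []

-- ===== PRECONDITION & SPEC =====
-- Pre_ excludes exactly the unknown pattern names, on which A raises ValueError.
def Pre_generate_pattern_sequence_py (pattern_type : String) (count : Int) (c : Int) (a_coeff : Int) (b_coeff : Int) : Prop :=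
  (pattern_type == "n_squared" || pattern_type == "n_squared_plus_c" ||
   pattern_type == "linear_an_plus_b" || pattern_type == "alternating_n" ||
   pattern_type == "alternating_n_squared") = true
instance (pattern_type : String) (count : Int) (c : Int) (a_coeff : Int) (b_coeff : Int) : Decidable (Pre_generate_pattern_sequence_py pattern_type count c a_coeff b_coeff) := by unfold Pre_generate_pattern_sequence_py; infer_instance
def pvWitness_generate_pattern_sequence_py : String × Int × Int × Int × Int := ("n_squared", 5, 0, 0, 0)
def Spec_generate_pattern_sequence_py (pattern_type : String) (count : Int) (c : Int) (a_coeff : Int) (b_coeff : Int) (out : List Int) : Prop := out = generate_pattern_sequence_py_alt pattern_type count c a_coeff b_coeff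
instance (pattern_type : String) (count : Int) (c : Int) (a_coeff : Int) (b_coeff : Int) (out : List Int) : Decidable (Spec_generate_pattern_sequence_py pattern_type count c a_coeff b_coeff out) := by unfold Spec_generate_pattern_sequence_py; infer_instance

-- ===== CLAIM =====
def Claim_equal_generate_pattern_sequence_py : Prop := ∀ (pattern_type : String) (count : Int) (c : Int) (a_coeff : Int) (b_coeff : Int), Dom_generate_pattern_sequence_py pattern_type count c a_coeff b_coeff → Pre_generate_pattern_sequence_py pattern_type count c a_coeff b_coeff → Spec_generate_pattern_sequence_py pattern_type count c a_coeff b_coeff (generate_pattern_sequence_py pattern_type count c a_coeff b_coeff)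

-- ===== LEMMAS AND PROOFS =====

-- Loop invariant: entering the iteration for n=m we have sq = (m-1)^2, sign = (-1)^(m+1),
-- lin = a*(m-1)+b; then the loop over [m, m+k) produces the map of the closed form f.
theorem pvLoopB_spec (pattern_type : String) (c a_coeff b_coeff : Int) (f : Int → Int)
    (hf : ∀ n : Int, 1 ≤ n →
      pvTermB pattern_type c n (n ^ 2) ((-1 : Int) ^ (n + 1).toNat) (a_coeff * n + b_coeff) = f n) :
    ∀ (k : ℕ) (m : Int) (seq : List Int), 1 ≤ m →
      pvLoopB pattern_type c a_coeff (PySem.List.pyRange m (m + (k : Int)) 1)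
        ((m - 1) ^ 2) ((-1 : Int) ^ (m + 1).toNat) (a_coeff * (m - 1) + b_coeff) seq
      = seq.reverse ++ (PySem.List.pyRange m (m + (k : Int)) 1).map f := by
  intro k
  induction k with
  | zero =>
    intro m seq _
    rw [PySem.List.pyRange_one_eq_nil (by omega)]
    simp [pvLoopB]
  | succ k ih =>
    intro m seq hm
    rw [PySem.List.pyRange_one_cons (by omega : m < m + ((k + 1 : ℕ) : Int))]
    simp only [pvLoopB, List.map_cons]
    have hsq : (m - 1) ^ 2 + (2 * m - 1) = m ^ 2 := by ring
    have hlin : a_coeff * (m - 1) + b_coeff + a_coeff = a_coeff * m + b_coeff := by ring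
    have hsign : -((-1 : Int) ^ (m + 1).toNat) = (-1 : Int) ^ (m + 1 + 1).toNat := by
      have h2 : (m + 1 + 1).toNat = (m + 1).toNat + 1 := by omega
      rw [h2, pow_succ]; ring
    rw [hsq, hlin, hf m hm, hsign]
    have hrange : m + ((k + 1 : ℕ) : Int) = (m + 1) + (k : Int) := by push_cast; ring
    rw [hrange]
    have := ih (m + 1) (f m :: seq) (by omega)
    simpa using this

-- the common instantiation at m = 1 together with the negative-count case
theorem pvLoopB_full (pattern_type : String) (c a_coeff b_coeff count : Int) (f : Int → Int)
    (hf : ∀ n : Int, 1 ≤ n →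
      pvTermB pattern_type c n (n ^ 2) ((-1 : Int) ^ (n + 1).toNat) (a_coeff * n + b_coeff) = f n) :
    pvLoopB pattern_type c a_coeff (PySem.List.pyRange 1 (count + 1) 1) 0 1 b_coeff []
      = (PySem.List.pyRange 1 (count + 1) 1).map f := by
  by_cases hc : 0 ≤ count
  · have hk : count + 1 = 1 + (count.toNat : Int) := by omega
    have h := pvLoopB_spec pattern_type c a_coeff b_coeff f hf count.toNat 1 [] le_rfl
    rw [hk]
    simpa using h
  · rw [PySem.List.pyRange_one_eq_nil (by omega)]
    simp [pvLoopB]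

-- ===== VERDICT =====
theorem generate_pattern_sequence_py_spec : Claim_equal_generate_pattern_sequence_py := by
  intro pattern_type count c a_coeff b_coeff _ hpre
  unfold Spec_generate_pattern_sequence_py
  unfold Pre_generate_pattern_sequence_py at hpre
  simp only [Bool.or_eq_true, beq_iff_eq] at hpre
  rcases hpre with ((((h | h) | h) | h) | h) <;> subst h <;>
    simp only [generate_pattern_sequence_py, generate_pattern_sequence_py_alt,
      List.contains_cons, beq_self_eq_true, Bool.true_or, Bool.or_true, Bool.not_true,
      Bool.false_eq_true, if_false, if_true, String.reduceBEq] <;>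
  · rw [pvLoopB_full]
    intro n hn
    simp [pvTermB]
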